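-- pv_equiv track=rewrite | github.com/pcalg/adventofcode | solutions/year_2019/day17_2.py | has_possible_route
-- ===== SOURCE A (Python) =====
-- def has_possible_route(total_route, sub_routes):
--     """
--     Check how it is possible to construct the total route from the sub_routes (part a, b and c)
--
--     Sub_routes has 3 items (0, 1, 2)
--
--     """
--
--     # start at idx
--     state = [(total_route, [])]
--
--     while len(state) > 0:
--         current_route, actions = state.pop()
--
--         # Found a solution when we covered the whole route
--         if len(current_route) == 0:
--             # Also the main routine (the actions) also has a restriction of 20 chars
--             if (len(actions) * 2 - 1) <= 20:
--                 return True, actions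
--             else:
--                 continue
--
--         # check if a sub_route matches
--         for idx, sub_route in enumerate(sub_routes):
--             size = len(sub_route)
--             if size > 0 and current_route[:size] == sub_route:
--                 state.append((current_route[size:], actions + [idx]))
--
--     # no solution
--     return False, None
-- ===== SOURCE B (Python) =====
-- def has_possible_route(total_route, sub_routes):
--     """Recursive backtracking instead of an explicit DFS stack; sub_routes are
--     tried in reversed index order to preserve the stack's LIFO preference."""
--
--     def solve(route, actions):
--         if not route:
--             return actions if len(actions) * 2 - 1 <= 20 else None
--         for idx, sub in reversed(list(enumerate(sub_routes))):
--             size = len(sub)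
--             if size > 0 and route[:size] == sub:
--                 result = solve(route[size:], actions + [idx])
--                 if result is not None:
--                     return result
--         return None
--
--     result = solve(total_route, [])
--     return (True, result) if result is not None else (False, None)
-- ===== Notes on version B (the rewrite author's own statement) =====
-- stated objective: alternative
-- what changed: Replaced the explicit worklist/stack DFS with recursive backtracking (a nested solve() that returns the first successful decomposition, trying sub_routes in reversed index order to preserve the stack's LIFO preference).
import Mathlib
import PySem

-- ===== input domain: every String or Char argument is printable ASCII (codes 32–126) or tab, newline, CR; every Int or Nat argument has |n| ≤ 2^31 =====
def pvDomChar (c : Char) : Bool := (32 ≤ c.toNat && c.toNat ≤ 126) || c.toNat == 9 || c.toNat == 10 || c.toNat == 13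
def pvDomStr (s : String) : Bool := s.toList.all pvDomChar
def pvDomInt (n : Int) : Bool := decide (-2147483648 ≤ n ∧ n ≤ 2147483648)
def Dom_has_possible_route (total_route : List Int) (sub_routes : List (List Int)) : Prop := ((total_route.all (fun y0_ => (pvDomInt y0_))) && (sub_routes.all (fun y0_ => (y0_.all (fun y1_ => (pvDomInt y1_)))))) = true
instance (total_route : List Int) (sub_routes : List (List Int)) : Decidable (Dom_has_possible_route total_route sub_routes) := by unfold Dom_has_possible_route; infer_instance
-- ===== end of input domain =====

-- B replaces A's explicit DFS stack by recursive backtracking over the same child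
-- order (sub_routes tried in reversed index order to match the stack's LIFO pops).



-- ===== PORT A =====
-- A explores with an explicit LIFO stack ('state'). We model the Python list with its
-- top (= last element, the one `pop()` takes) at the HEAD, so `append` conses; the
-- children pushed in idx order 0,1,2 therefore appear reversed at the head.
-- current_route[:size] / [size:] with size = len(sub_route) ≥ 0 are exactly take/drop.

-- the list of entries A's inner for-loop appends, in push (= idx) order
def pvChildrenA (sub_routes : List (List Int)) (r a : List Int) : List (List Int × List Int) :=
  (PySem.List.enumerate sub_routes).filterMap (fun p =>
    if 0 < p.2.length ∧ r.take p.2.length = p.2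
    then some (r.drop p.2.length, a ++ [p.1]) else none)

-- termination measure: each stack entry with route of length l weighs (m+1)^l
def pvW (m : Nat) (stack : List (List Int × List Int)) : Nat :=
  (stack.map (fun p => (m + 1) ^ p.1.length)).sum

theorem pvChildrenA_length_le (s : List (List Int)) (r a : List Int) :
    (pvChildrenA s r a).length ≤ s.length := by
  calc (pvChildrenA s r a).length ≤ (PySem.List.enumerate s).length := List.length_filterMap_le _ _
    _ = s.length := PySem.List.length_enumerate _ _

theorem pvChildrenA_route_lt (s : List (List Int)) (r a : List Int) (hr : r ≠ [])
    (p : List Int × List Int) (hp : p ∈ pvChildrenA s r a) : p.1.length < r.length := by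
  rcases List.mem_filterMap.1 hp with ⟨q, _, hq⟩
  by_cases h : 0 < q.2.length ∧ r.take q.2.length = q.2
  · simp only [if_pos h] at hq
    cases hq
    have hlen : q.2.length ≤ r.length := by
      have := congrArg List.length h.2
      simp at this; omega
    simp only [List.length_drop]
    have : 0 < r.length := List.length_pos_iff.2 hr
    omega
  · simp [if_neg h] at hq

theorem pvW_lt (s : List (List Int)) (r a : List Int) (hr : r ≠ [])
    (rest : List (List Int × List Int)) :
    pvW s.length ((pvChildrenA s r a).reverse ++ rest) < pvW s.length ((r, a) :: rest) := by
  have key : pvW s.length (pvChildrenA s r a) < (s.length + 1) ^ r.length := by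
    have hb : ∀ x ∈ (pvChildrenA s r a).map (fun p => (s.length + 1) ^ p.1.length),
        x ≤ (s.length + 1) ^ (r.length - 1) := by
      intro x hx
      rcases List.mem_map.1 hx with ⟨p, hp, rfl⟩
      exact Nat.pow_le_pow_right (Nat.succ_le_succ (Nat.zero_le _))
        (by have := pvChildrenA_route_lt s r a hr p hp; omega)
    have hsum := List.sum_le_card_nsmul _ _ hb
    have hrl : 0 < r.length := List.length_pos_iff.2 hr
    have hlen : ((pvChildrenA s r a).map (fun p => (s.length + 1) ^ p.1.length)).length ≤ s.length := by
      simpa using pvChildrenA_length_le s r a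
    calc pvW s.length (pvChildrenA s r a)
        ≤ ((pvChildrenA s r a).map (fun p => (s.length + 1) ^ p.1.length)).length *
            (s.length + 1) ^ (r.length - 1) := by simpa [pvW, smul_eq_mul] using hsum
      _ ≤ s.length * (s.length + 1) ^ (r.length - 1) :=
          Nat.mul_le_mul_right _ hlen
      _ < (s.length + 1) * (s.length + 1) ^ (r.length - 1) :=
          Nat.mul_lt_mul_of_lt_of_le (Nat.lt_succ_self _) le_rfl (Nat.pow_pos (Nat.succ_pos _))
      _ = (s.length + 1) ^ r.length := by
          rw [← pow_succ']
          congr 1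
          omega
  have h1 : pvW s.length ((pvChildrenA s r a).reverse ++ rest)
      = pvW s.length (pvChildrenA s r a) + pvW s.length rest := by
    simp [pvW, List.map_reverse, List.sum_reverse]
  have h2 : pvW s.length ((r, a) :: rest) = (s.length + 1) ^ r.length + pvW s.length rest := by
    simp [pvW]
  omega

-- the while-loop of A (stack top at head)
def pvLoopA (sub_routes : List (List Int)) : List (List Int × List Int) → Bool × Option (List Int)
  | [] => (false, none)
  | (r, a) :: rest =>
    if r = [] then
      if ((a.length : Int) * 2 - 1 ≤ 20 : Bool) then (true, some a)
      else pvLoopA sub_routes rest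
    else pvLoopA sub_routes ((pvChildrenA sub_routes r a).reverse ++ rest)
termination_by stack => pvW sub_routes.length stack
decreasing_by
  · simp only [pvW, List.map_cons, List.sum_cons]
    have : 0 < (sub_routes.length + 1) ^ r.length := Nat.pow_pos (Nat.succ_pos _)
    omega
  · exact pvW_lt sub_routes r a (by assumption) rest

def has_possible_route (total_route : List Int) (sub_routes : List (List Int)) : Bool × Option (List Int) :=
  pvLoopA sub_routes [(total_route, [])]

-- ===== PORT B =====
-- B (Source B): recursive backtracking; pvGo is `solve`, pvTry is its for-loop over
-- reversed(list(enumerate(sub_routes))).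
mutual
def pvGo (s : List (List Int)) (r a : List Int) : Option (List Int) :=
  if r = [] then (if ((a.length : Int) * 2 - 1 ≤ 20 : Bool) then some a else none)
  else pvTry s (PySem.List.enumerate s).reverse r a
termination_by (r.length, s.length + 1)

def pvTry (s : List (List Int)) (cands : List (Int × List Int)) (r a : List Int) : Option (List Int) :=
  match cands with
  | [] => none
  | (idx, sub) :: rest =>
    if h : 0 < sub.length ∧ r.take sub.length = sub then
      match pvGo s (r.drop sub.length) (a ++ [idx]) with
      | some res => some res
      | none => pvTry s rest r a
    else pvTry s rest r a
termination_by (r.length, cands.length)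
decreasing_by
  all_goals
    first
      | (apply Prod.Lex.left
         obtain ⟨h1, h2⟩ := h
         have hlen : sub.length ≤ r.length := by
           have := congrArg List.length h2; simp at this; omega
         simp only [List.length_drop]
         omega)
      | (apply Prod.Lex.right
         simp
         try omega)
end

def has_possible_route_alt (total_route : List Int) (sub_routes : List (List Int)) : Bool × Option (List Int) :=
  match pvGo sub_routes total_route [] with
  | some res => (true, some res)
  | none => (false, none)

-- ===== PRECONDITION & SPEC =====
def Spec_has_possible_route (total_route : List Int) (sub_routes : List (List Int)) (out : Bool × Option (List Int)) : Prop := out = has_possible_route_alt total_route sub_routes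
instance (total_route : List Int) (sub_routes : List (List Int)) (out : Bool × Option (List Int)) : Decidable (Spec_has_possible_route total_route sub_routes out) := by unfold Spec_has_possible_route; infer_instance

-- ===== CLAIM (what is proved, stated in full; the proofs are below) =====
def Claim_equal_has_possible_route : Prop := ∀ (total_route : List Int) (sub_routes : List (List Int)), Dom_has_possible_route total_route sub_routes → Spec_has_possible_route total_route sub_routes (has_possible_route total_route sub_routes)

-- ===== LEMMAS AND PROOFS =====

-- pvTry is findSome? of pvGo over the children generated by the matching candidates
theorem pvTry_eq_findSome (s : List (List Int)) (r a : List Int)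
    (cands : List (Int × List Int)) :
    pvTry s cands r a =
      (cands.filterMap (fun p =>
        if 0 < p.2.length ∧ r.take p.2.length = p.2
        then some (r.drop p.2.length, a ++ [p.1]) else none)).findSome?
        (fun q => pvGo s q.1 q.2) := by
  induction cands with
  | nil => rw [pvTry.eq_def]; simp
  | cons c rest ih =>
    obtain ⟨idx, sub⟩ := c
    rw [pvTry.eq_def]
    by_cases h : 0 < sub.length ∧ r.take sub.length = sub
    · simp only [dif_pos h, List.filterMap_cons, if_pos h, List.findSome?_cons]
      cases pvGo s (r.drop sub.length) (a ++ [idx]) with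
      | none => simpa using ih
      | some res => simp
    · simp only [dif_neg h, List.filterMap_cons, if_neg h]
      exact ih

-- the main invariant: A's stack loop returns the first pvGo-success on the stack
theorem pvLoopA_eq (s : List (List Int)) (n : Nat) :
    ∀ stack : List (List Int × List Int), pvW s.length stack ≤ n →
    pvLoopA s stack =
      match stack.findSome? (fun q => pvGo s q.1 q.2) with
      | some res => (true, some res)
      | none => (false, none) := by
  induction n with
  | zero =>
    intro stack h
    cases stack with
    | nil => simp [pvLoopA]
    | cons p rest =>
      exfalso
      simp only [pvW, List.map_cons, List.sum_cons] at h
      have : 0 < (s.length + 1) ^ p.1.length := Nat.pow_pos (Nat.succ_pos _)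
      omega
  | succ n ih =>
    intro stack h
    cases stack with
    | nil => simp [pvLoopA]
    | cons p rest =>
      obtain ⟨r, a⟩ := p
      by_cases hr : r = []
      · subst hr
        rw [pvLoopA, if_pos rfl]
        rw [List.findSome?_cons]
        rw [pvGo.eq_def]
        simp only [reduceIte]
        split
        · rfl
        · apply ih
          simp only [pvW, List.map_cons, List.sum_cons, List.length_nil, pow_zero] at h ⊢
          omega
      · rw [pvLoopA, if_neg hr]
        have hdec := pvW_lt s r a hr rest
        have hle : pvW s.length ((pvChildrenA s r a).reverse ++ rest) ≤ n := by
          simp only [pvW, List.map_cons, List.sum_cons] at h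
          simp only [pvW] at hdec ⊢
          simp only [List.map_cons, List.sum_cons] at hdec
          omega
        rw [ih _ hle]
        rw [List.findSome?_append]
        have hgo : pvGo s r a = pvTry s (PySem.List.enumerate s).reverse r a := by
          rw [pvGo.eq_def, if_neg hr]
        have hrev : (pvChildrenA s r a).reverse.findSome? (fun q => pvGo s q.1 q.2)
            = pvGo s r a := by
          rw [hgo, pvTry_eq_findSome]
          congr 1
          simp [pvChildrenA, List.filterMap_reverse]
        rw [List.findSome?_cons, hrev]
        cases pvGo s r a with
        | some res => simp
        | none => simp

-- ===== VERDICT (by name: the statement is the Claim_ definition above) =====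
theorem has_possible_route_spec : Claim_equal_has_possible_route := by
  intro total_route sub_routes _
  unfold Spec_has_possible_route has_possible_route has_possible_route_alt
  rw [pvLoopA_eq sub_routes (pvW sub_routes.length [(total_route, [])]) _ le_rfl]
  simp only [List.findSome?_cons, List.findSome?_nil]
  cases pvGo sub_routes total_route [] with
  | some res => simp
  | none => simp
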